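-- pv_equiv track=rewrite | github.com/lishehao-ctrl/CalendarDIFF | app/modules/sync/email_rules.py | _contains_sequence
-- ===== SOURCE A (Python) =====
-- def _contains_sequence(tokens: list[str], phrase: tuple[str, ...]) -> bool:
--     width = len(phrase)
--     if width == 0 or len(tokens) < width:
--         return False
--     for idx in range(0, len(tokens) - width + 1):
--         if tuple(tokens[idx : idx + width]) == phrase:
--             return True
--     return False
-- ===== SOURCE B (Python) =====
-- def _contains_sequence(tokens: list[str], phrase: tuple[str, ...]) -> bool:
--     target = list(phrase)
--     if not target:
--         return False
--     window = []
--     for token in tokens: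
--         window.append(token)
--         if len(window) > len(target):
--             window.pop(0)
--         if window == target:
--             return True
--     return False
-- ===== Notes on version B (the rewrite author's own statement) =====
-- stated objective: alternative
-- what changed: Replaced A's scan over all start indices with slice-and-compare per index by a single left-to-right pass that maintains a sliding window of the last len(phrase) tokens and compares it to the phrase.
import Mathlib
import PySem

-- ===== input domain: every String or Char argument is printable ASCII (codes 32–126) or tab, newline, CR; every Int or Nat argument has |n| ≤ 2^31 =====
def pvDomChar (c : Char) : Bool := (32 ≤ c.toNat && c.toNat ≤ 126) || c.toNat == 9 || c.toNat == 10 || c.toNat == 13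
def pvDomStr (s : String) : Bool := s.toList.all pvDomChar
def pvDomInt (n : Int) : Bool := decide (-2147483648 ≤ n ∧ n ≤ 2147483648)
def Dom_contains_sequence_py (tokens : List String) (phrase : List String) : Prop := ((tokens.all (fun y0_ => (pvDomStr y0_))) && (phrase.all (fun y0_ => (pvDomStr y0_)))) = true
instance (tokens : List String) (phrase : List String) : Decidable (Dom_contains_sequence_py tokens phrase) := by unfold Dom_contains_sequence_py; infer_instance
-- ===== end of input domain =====

-- B replaces A's indexed slice-per-position scan by a single pass that maintains a sliding
-- window of the last len(phrase) tokens (objective: alternative; not claimed faster).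

-- ===== PORT A =====
-- the 'for idx in range(...)' loop with early 'return True'
def pvALoop (tokens : List String) (phrase : List String) (idxs : List Int) : Bool :=
  match idxs with
  | [] => false
  | i :: rest =>
    if PySem.List.slice tokens (some i) (some (i + (phrase.length : Int))) == phrase then true
    else pvALoop tokens phrase rest

def contains_sequence_py (tokens : List String) (phrase : List String) : Bool :=
  let width : Int := phrase.length
  if width == 0 || (tokens.length : Int) < width then false
  else pvALoop tokens phrase (PySem.List.pyRange 0 ((tokens.length : Int) - width + 1) 1)

-- ===== PORT B =====
-- the 'for token in tokens' loop of Source B; 'window.pop(0)' is only reached on a non-empty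
-- window, where it is exactly List.tail
def pvBLoop (target : List String) (window : List String) (ts : List String) : Bool :=
  match ts with
  | [] => false
  | t :: rest =>
    let w1 := window ++ [t]
    let w2 := if target.length < w1.length then w1.tail else w1
    if w2 == target then true else pvBLoop target w2 rest

def contains_sequence_py_alt (tokens : List String) (phrase : List String) : Bool :=
  let target := phrase
  if target.isEmpty then false
  else pvBLoop target [] tokens

-- ===== PRECONDITION & SPEC =====
def Spec_contains_sequence_py (tokens : List String) (phrase : List String) (out : Bool) : Prop := out = contains_sequence_py_alt tokens phrase
instance (tokens : List String) (phrase : List String) (out : Bool) : Decidable (Spec_contains_sequence_py tokens phrase out) := by unfold Spec_contains_sequence_py; infer_instance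

-- ===== CLAIM (what is proved, stated in full; the proofs are below) =====
def Claim_equal_contains_sequence_py : Prop := ∀ (tokens : List String) (phrase : List String), Dom_contains_sequence_py tokens phrase → Spec_contains_sequence_py tokens phrase (contains_sequence_py tokens phrase)

-- ===== LEMMAS AND PROOFS =====

-- the last m elements of l
def lastN (m : Nat) (l : List String) : List String := l.drop (l.length - m)

theorem length_lastN (m : Nat) (l : List String) : (lastN m l).length = min m l.length := by
  unfold lastN; simp; omega

theorem lastN_absorb (m : Nat) (x p : List String) :
    lastN m (lastN m x ++ p) = lastN m (x ++ p) := by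
  unfold lastN
  rw [List.length_append, List.length_drop, List.drop_append, List.drop_append, List.drop_drop]
  simp only [List.length_append, List.length_drop]
  congr 1 <;> congr 1 <;> omega

theorem pvBLoop_step (target window : List String) (t : String)
    (h : window.length ≤ target.length) :
    (if target.length < (window ++ [t]).length then (window ++ [t]).tail else (window ++ [t]))
      = lastN target.length (window ++ [t]) := by
  unfold lastN
  rcases Nat.lt_or_ge target.length (window.length + 1) with hlt | hge
  · rw [if_pos (by simp only [List.length_append, List.length_cons, List.length_nil]; omega)]
    have h1 : (window ++ [t]).length - target.length = 1 := by
      simp only [List.length_append, List.length_cons, List.length_nil]; omega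
    rw [h1, List.drop_one]
  · rw [if_neg (by simp only [List.length_append, List.length_cons, List.length_nil]; omega)]
    have h0 : (window ++ [t]).length - target.length = 0 := by
      simp only [List.length_append, List.length_cons, List.length_nil]; omega
    rw [h0, List.drop_zero]

theorem pvBLoop_iff (target : List String) :
    ∀ (ts window : List String), window.length ≤ target.length →
      (pvBLoop target window ts = true ↔
        ∃ k, k < ts.length ∧ lastN target.length (window ++ ts.take (k+1)) = target) := by
  intro ts
  induction ts with
  | nil => intro window _; simp [pvBLoop]
  | cons t rest ih =>
    intro window hw
    rw [show pvBLoop target window (t :: rest)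
        = (if (if target.length < (window ++ [t]).length then (window ++ [t]).tail else (window ++ [t])) == target then true
           else pvBLoop target (if target.length < (window ++ [t]).length then (window ++ [t]).tail else (window ++ [t])) rest) from rfl]
    rw [pvBLoop_step target window t hw]
    have hw2 : (lastN target.length (window ++ [t])).length ≤ target.length := by
      rw [length_lastN]; omega
    by_cases h : lastN target.length (window ++ [t]) = target
    · simp only [h, beq_self_eq_true, if_true]
      constructor
      · intro _; exact ⟨0, by simp, by simpa using h⟩
      · intro _; trivial
    · rw [if_neg (by simpa using h), ih _ hw2]
      constructor
      · rintro ⟨k, hk, hlast⟩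
        refine ⟨k + 1, by simpa using Nat.succ_lt_succ hk, ?_⟩
        rw [lastN_absorb] at hlast
        simpa [List.append_assoc] using hlast
      · rintro ⟨k, hk, hlast⟩
        match k with
        | 0 => exact absurd (by simpa using hlast) h
        | k' + 1 =>
          refine ⟨k', by simp only [List.length_cons] at hk; omega, ?_⟩
          rw [lastN_absorb]
          simpa [List.append_assoc] using hlast

theorem pvALoop_any (tokens phrase : List String) (idxs : List Int) :
    pvALoop tokens phrase idxs =
      idxs.any (fun i => PySem.List.slice tokens (some i) (some (i + (phrase.length : Int))) == phrase) := by
  induction idxs with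
  | nil => rfl
  | cons i rest ih =>
    rw [show pvALoop tokens phrase (i :: rest)
        = (if PySem.List.slice tokens (some i) (some (i + (phrase.length : Int))) == phrase then true
           else pvALoop tokens phrase rest) from rfl, List.any_cons, ih]
    split <;> simp_all

theorem bridge (tokens phrase : List String) (hm : 1 ≤ phrase.length) :
    ((∃ j : Nat, j + phrase.length ≤ tokens.length ∧ (tokens.drop j).take phrase.length = phrase)
      ↔ (∃ k, k < tokens.length ∧ lastN phrase.length (tokens.take (k+1)) = phrase)) := by
  constructor
  · rintro ⟨j, hj, hs⟩
    refine ⟨j + phrase.length - 1, by omega, ?_⟩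
    have hk1 : j + phrase.length - 1 + 1 = j + phrase.length := by omega
    rw [hk1]
    unfold lastN
    rw [List.length_take, List.drop_take]
    have e : min (j + phrase.length) tokens.length - phrase.length = j := by omega
    rw [e]
    have e' : j + phrase.length - j = phrase.length := by omega
    rw [e']
    exact hs
  · rintro ⟨k, hk, hlast⟩
    have hlen : (lastN phrase.length (tokens.take (k+1))).length = phrase.length := by
      rw [hlast]
    rw [length_lastN, List.length_take] at hlen
    have hmk : phrase.length ≤ k + 1 := by omega
    refine ⟨k + 1 - phrase.length, by omega, ?_⟩
    unfold lastN at hlast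
    rw [List.length_take, List.drop_take] at hlast
    have e1 : min (k+1) tokens.length - phrase.length = k + 1 - phrase.length := by omega
    rw [e1] at hlast
    have e2 : k + 1 - (k + 1 - phrase.length) = phrase.length := by omega
    rw [e2] at hlast
    exact hlast

-- ===== VERDICT (by name: the statement is the Claim_ definition above) =====
theorem contains_sequence_py_spec : Claim_equal_contains_sequence_py := by
  intro tokens phrase _
  unfold Spec_contains_sequence_py contains_sequence_py contains_sequence_py_alt
  simp only []
  rw [Bool.eq_iff_iff]
  by_cases hp : phrase = []
  · subst hp; simp
  · have hm : 1 ≤ phrase.length := by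
      cases phrase with | nil => exact absurd rfl hp | cons a l => simp
    by_cases hn : tokens.length < phrase.length
    · rw [if_pos (by simp only [Bool.or_eq_true, beq_iff_eq, decide_eq_true_eq]; omega), if_neg (by simpa using hp)]
      rw [pvBLoop_iff phrase tokens [] (by simp)]
      simp only [List.nil_append]
      constructor
      · intro h; exact absurd h (by simp)
      · rintro ⟨k, hk, hlast⟩
        have := congrArg List.length hlast
        rw [length_lastN, List.length_take] at this
        omega
    · rw [Nat.not_lt] at hn
      rw [if_neg (by simp only [Bool.or_eq_true, beq_iff_eq, decide_eq_true_eq]; omega), if_neg (by simpa using hp)]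
      rw [pvALoop_any, pvBLoop_iff phrase tokens [] (by simp)]
      simp only [List.nil_append, List.any_eq_true, beq_iff_eq]
      rw [← bridge tokens phrase hm]
      constructor
      · rintro ⟨i, hmem, hs⟩
        rw [PySem.List.mem_pyRange_one] at hmem
        obtain ⟨h0, h1⟩ := hmem
        refine ⟨i.toNat, by omega, ?_⟩
        have hi : i = ((i.toNat : Nat) : Int) := by omega
        rw [hi, PySem.List.slice_natCast_add] at hs
        exact hs
      · rintro ⟨j, hj, hs⟩
        refine ⟨(j : Int), ?_, ?_⟩
        · rw [PySem.List.mem_pyRange_one]; constructor <;> [omega; omega]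
        · rw [PySem.List.slice_natCast_add]
          exact hs
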